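-- pv_equiv track=rewrite | github.com/MusicApplication-PG-CE/Music-Application | src/utils2.py | tillNextDoubleQuote
-- ===== SOURCE A (Python) =====
-- def tillNextDoubleQuote(s:str):
--   '''Returns a substring as s[0:e] where e is the first double quote found that is not preceeded by a backslash'''
--   out = ''
--   escaping = False
--
--   for c in s:
--     if escaping:
--       if c == 'u':
--         out += '\\'
--       escaping = False
--       out += c
--
--     else:
--       if c == '\\':
--         escaping = True
--       elif c == '"':
--         return out
--       else:
--         out += c
--   return out.replace(r'\u0026','\u0026')#bytes(out,'utf-8').decode('unicode_escape')
-- ===== SOURCE B (Python) =====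
-- def tillNextDoubleQuote(s: str):
--     n = len(s)
--     # pass 1: find the position of the first unescaped double quote
--     i = 0
--     e = None
--     while i < n:
--         if s[i] == '\\':
--             i += 2
--         elif s[i] == '"':
--             e = i
--             break
--         else:
--             i += 1
--     end = n if e is None else e
--     # pass 2: decode the prefix s[:end] by index jumps
--     parts = []
--     j = 0
--     while j < end:
--         c = s[j]
--         if c == '\\':
--             if j + 1 < end:
--                 nxt = s[j + 1]
--                 parts.append('\\' + nxt if nxt == 'u' else nxt)
--             j += 2
--         else:
--             parts.append(c)
--             j += 1
--     t = ''.join(parts)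
--     return t if e is not None else t.replace('\\u0026', '\u0026')
-- ===== Notes on version B (the rewrite author's own statement) =====
-- stated objective: alternative
-- what changed: A's single stateful scan with an `escaping` flag is replaced by two index-driven passes: one locating the first unescaped double quote, and one decoding the prefix by jumping over backslash pairs.
import Mathlib
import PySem

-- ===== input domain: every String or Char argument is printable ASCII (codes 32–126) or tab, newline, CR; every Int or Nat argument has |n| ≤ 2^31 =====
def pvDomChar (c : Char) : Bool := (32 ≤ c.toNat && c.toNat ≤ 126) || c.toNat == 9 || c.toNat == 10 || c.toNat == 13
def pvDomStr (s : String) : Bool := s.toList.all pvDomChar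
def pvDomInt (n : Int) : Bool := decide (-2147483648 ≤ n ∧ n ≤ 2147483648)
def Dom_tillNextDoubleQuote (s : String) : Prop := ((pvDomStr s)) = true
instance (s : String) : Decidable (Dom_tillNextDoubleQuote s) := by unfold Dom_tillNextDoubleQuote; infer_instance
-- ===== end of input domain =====

-- B is an alternative decomposition: a first pass locates the first unescaped quote,
-- a second pass decodes the prefix by index jumps; same values, same cost (objective: alternative).

-- ===== PORT A =====
-- A's single pass with an `escaping` flag; early `return out` on an unescaped quote,
-- otherwise the final `.replace(r'\u0026', '\u0026')` ('\u0026' is '&').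
def pvAGo : List Char → List Char → Bool → String
  | [], out, _ => PySem.Str.replace (String.ofList out) "\\u0026" "&"
  | c :: rest, out, esc =>
    if esc then
      pvAGo rest (out ++ (if c = 'u' then ['\\', c] else [c])) false
    else
      if c = '\\' then pvAGo rest out true
      else if c = '"' then String.ofList out
      else pvAGo rest (out ++ [c]) false

def tillNextDoubleQuote (s : String) : String := pvAGo s.toList [] false

-- ===== PORT B =====
-- pass 1 of Source B: index of the first unescaped '"' (a backslash skips the next char)
def pvFindEnd : List Char → Nat → Option Nat
  | [], _ => none
  | c :: rest, i =>
    if c = '\\' then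
      match rest with
      | [] => none
      | _ :: r => pvFindEnd r (i + 2)
    else if c = '"' then some i
    else pvFindEnd rest (i + 1)

-- pass 2 of Source B: decode the prefix by jumps ('\' takes the next char, kept with '\' only before 'u')
def pvDecode : List Char → List Char
  | [] => []
  | c :: rest =>
    if c = '\\' then
      match rest with
      | [] => []
      | nxt :: r => (if nxt = 'u' then ['\\', nxt] else [nxt]) ++ pvDecode r
    else c :: pvDecode rest

def tillNextDoubleQuote_alt (s : String) : String :=
  match pvFindEnd s.toList 0 with
  | some e => String.ofList (pvDecode (s.toList.take e))
  | none => PySem.Str.replace (String.ofList (pvDecode s.toList)) "\\u0026" "&"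

-- ===== PRECONDITION & SPEC =====
def Spec_tillNextDoubleQuote (s : String) (out : String) : Prop := out = tillNextDoubleQuote_alt s
instance (s : String) (out : String) : Decidable (Spec_tillNextDoubleQuote s out) := by unfold Spec_tillNextDoubleQuote; infer_instance

-- ===== CLAIM (what is proved, stated in full; the proofs are below) =====
def Claim_equal_tillNextDoubleQuote : Prop := ∀ (s : String), Dom_tillNextDoubleQuote s → Spec_tillNextDoubleQuote s (tillNextDoubleQuote s)

-- ===== LEMMAS AND PROOFS =====
-- step lemmas unfolding the three recursions one shape at a time
theorem pvFindEnd_bs1 (i : Nat) : pvFindEnd ['\\'] i = none := rfl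
theorem pvFindEnd_bs (nxt : Char) (r : List Char) (i : Nat) :
    pvFindEnd ('\\' :: nxt :: r) i = pvFindEnd r (i + 2) := rfl
theorem pvFindEnd_quote (r : List Char) (i : Nat) : pvFindEnd ('"' :: r) i = some i := by
  rw [pvFindEnd.eq_def]; simp
theorem pvFindEnd_other (c : Char) (r : List Char) (i : Nat) (hc : c ≠ '\\') (hq : c ≠ '"') :
    pvFindEnd (c :: r) i = pvFindEnd r (i + 1) := by
  rw [pvFindEnd.eq_def]; simp [hc, hq]

theorem pvDecode_bs1 : pvDecode ['\\'] = [] := rfl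
theorem pvDecode_bs (nxt : Char) (r : List Char) :
    pvDecode ('\\' :: nxt :: r) = (if nxt = 'u' then ['\\', nxt] else [nxt]) ++ pvDecode r := rfl
theorem pvDecode_other (c : Char) (r : List Char) (hc : c ≠ '\\') :
    pvDecode (c :: r) = c :: pvDecode r := by
  rw [pvDecode.eq_def]; simp [hc]

theorem pvAGo_esc (c : Char) (rest out : List Char) :
    pvAGo (c :: rest) out true = pvAGo rest (out ++ (if c = 'u' then ['\\', c] else [c])) false := rfl
theorem pvAGo_bs (rest out : List Char) : pvAGo ('\\' :: rest) out false = pvAGo rest out true := rfl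
theorem pvAGo_quote (rest out : List Char) : pvAGo ('"' :: rest) out false = String.ofList out := rfl
theorem pvAGo_other (c : Char) (rest out : List Char) (hc : c ≠ '\\') (hq : c ≠ '"') :
    pvAGo (c :: rest) out false = pvAGo rest (out ++ [c]) false := by
  rw [pvAGo.eq_def]; simp [hc, hq]

theorem pvFindEnd_shift (n : Nat) : ∀ (l : List Char) (i : Nat), l.length ≤ n →
    pvFindEnd l i = Option.map (· + i) (pvFindEnd l 0) := by
  induction n with
  | zero =>
    intro l i h
    have : l = [] := List.eq_nil_of_length_eq_zero (Nat.le_zero.mp h)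
    subst this; simp [pvFindEnd]
  | succ n ih =>
    intro l i h
    match l with
    | [] => simp [pvFindEnd]
    | c :: rest =>
      by_cases hc : c = '\\'
      · subst hc
        match rest with
        | [] => simp [pvFindEnd_bs1]
        | nxt :: r =>
          have h2 : r.length ≤ n := by simp at h; omega
          rw [pvFindEnd_bs, pvFindEnd_bs, ih r (i + 2) h2, ih r 2 h2]
          cases pvFindEnd r 0 <;> simp <;> omega
      · by_cases hq : c = '"'
        · subst hq; simp [pvFindEnd_quote]
        · have h1 : rest.length ≤ n := by simp at h; omega
          rw [pvFindEnd_other c rest i hc hq, pvFindEnd_other c rest 0 hc hq,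
            ih rest (i + 1) h1, ih rest 1 h1]
          cases pvFindEnd rest 0 <;> simp <;> omega

theorem pvAGo_eq (l : List Char) (out : List Char) :
    pvAGo l out false =
      match pvFindEnd l 0 with
      | some e => String.ofList (out ++ pvDecode (l.take e))
      | none => PySem.Str.replace (String.ofList (out ++ pvDecode l)) "\\u0026" "&" := by
  induction hn : l.length using Nat.strong_induction_on generalizing l out with
  | _ n ih =>
    match l with
    | [] => simp [pvAGo, pvFindEnd, pvDecode]
    | c :: rest =>
      by_cases hc : c = '\\'
      · subst hc
        match rest with
        | [] => simp [pvAGo, pvFindEnd_bs1, pvDecode_bs1]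
        | nxt :: r =>
          have hlen : r.length < n := by simp at hn; omega
          rw [pvAGo_bs, pvAGo_esc, ih r.length hlen r _ rfl, pvFindEnd_bs,
            pvFindEnd_shift r.length r 2 le_rfl]
          cases hfe : pvFindEnd r 0 with
          | none => simp [pvDecode_bs, List.append_assoc]
          | some e =>
            have ht : ('\\' :: nxt :: r).take (e + 2) = '\\' :: nxt :: r.take e := by
              simp [List.take_succ_cons]
            simp [ht, pvDecode_bs, List.append_assoc]
      · by_cases hq : c = '"'
        · subst hq
          simp [pvAGo_quote, pvFindEnd_quote, pvDecode]
        · have hlen : rest.length < n := by simp at hn; omega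
          rw [pvAGo_other c rest out hc hq, ih rest.length hlen rest _ rfl,
            pvFindEnd_other c rest 0 hc hq, pvFindEnd_shift rest.length rest 1 le_rfl]
          cases hfe : pvFindEnd rest 0 with
          | none => simp [pvDecode_other c rest hc, List.append_assoc]
          | some e =>
            have ht : (c :: rest).take (e + 1) = c :: rest.take e := by simp
            simp [ht, pvDecode_other c _ hc, List.append_assoc]

-- ===== VERDICT (by name: the statement is the Claim_ definition above) =====
theorem tillNextDoubleQuote_spec : Claim_equal_tillNextDoubleQuote := by
  intro s _
  unfold Spec_tillNextDoubleQuote tillNextDoubleQuote tillNextDoubleQuote_alt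
  rw [pvAGo_eq]
  cases pvFindEnd s.toList 0 <;> simp
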